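-- pv_equiv track=rewrite | github.com/TheAlgorithms/Python | StringToASCII/StringToASCII.py | stringToAscii
-- ===== SOURCE A (Python) =====
-- def stringToAscii(string):
--   NumberDec = []
--   NumberBin = []
--   NumberHex = []
--   NumberOct = []
--
--   for i in string:
--     NumberBin.append(bin(ord(i)))
--     NumberHex.append(hex(ord(i)))
--     NumberOct.append(oct(ord(i)))
--     NumberDec.append(ord(i))
--   message = ""
--   message += "Decimal numbers: "
--   for i in NumberDec:
--       message += str(i) + ", "
--   message += "\n"
--   message += "Hex numbers: "
--   for i in NumberHex:
--       message += str(i)[2:] + ", "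
--   message += "\n"
--   message += "Octal numbers: "
--   for i in NumberOct:
--       message += str(i)[2:] + ", "
--   message += "\n"
--   message += "Binary numbers: "
--   for i in NumberBin:
--       message += str(i)[2:] + ", "
--
--   return message;
-- ===== SOURCE B (Python) =====
-- def stringToAscii(string):
--   dec = ""
--   hexs = ""
--   octs = ""
--   bins = ""
--   for ch in string:
--     c = ord(ch)
--     dec += f"{c}, "
--     hexs += f"{c:x}, "
--     octs += f"{c:o}, "
--     bins += f"{c:b}, "
--   return ("Decimal numbers: " + dec + "\n" +
--           "Hex numbers: " + hexs + "\n" +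
--           "Octal numbers: " + octs + "\n" +
--           "Binary numbers: " + bins)
-- ===== Notes on version B (the rewrite author's own statement) =====
-- stated objective: simpler
-- what changed: B makes a single pass over the string, accumulating the four rendered number strings directly (prefix-free base formatting), instead of building four intermediate lists and re-traversing them in four extra formatting loops with [2:] prefix stripping.
import Mathlib
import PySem

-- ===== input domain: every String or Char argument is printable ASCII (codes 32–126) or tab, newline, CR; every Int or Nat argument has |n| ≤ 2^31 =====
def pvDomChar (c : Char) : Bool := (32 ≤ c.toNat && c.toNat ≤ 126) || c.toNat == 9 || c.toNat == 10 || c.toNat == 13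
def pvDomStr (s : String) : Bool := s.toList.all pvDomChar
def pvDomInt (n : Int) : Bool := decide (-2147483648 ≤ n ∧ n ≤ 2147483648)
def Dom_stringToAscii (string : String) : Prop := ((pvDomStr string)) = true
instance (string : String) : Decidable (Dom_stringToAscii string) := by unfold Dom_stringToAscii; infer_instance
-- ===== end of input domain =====

-- B replaces A's four intermediate lists and four extra formatting loops by one pass that
-- accumulates the four rendered strings directly (prefix-free base formatting); same return value.

-- shared digit renderer: lowercase base-`base` digits of n, no prefix
-- = Python's f'{n:x}'/f'{n:o}'/f'{n:b}' (exact for 0 ≤ n; ord(ch) is always ≥ 0)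
def pvDigits (base : Nat) (n : Int) : String := String.ofList (Nat.toDigits base n.toNat)

-- ===== PORT A =====
-- bin/hex/oct builtins (exact for the nonnegative ints they are applied to here)
def pvPyBin (n : Int) : String := "0b" ++ pvDigits 2 n
def pvPyHex (n : Int) : String := "0x" ++ pvDigits 16 n
def pvPyOct (n : Int) : String := "0o" ++ pvDigits 8 n
-- s[2:] on a string (exact: Python's drop-first-2 slice)
def pvDrop2 (s : String) : String := String.ofList (s.toList.drop 2)

def stringToAscii (string : String) : String :=
  -- the single for-loop appending to NumberDec/NumberBin/NumberHex/NumberOct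
  let st := string.toList.foldl
    (fun (st : List Int × List String × List String × List String) i =>
      (st.1 ++ [((i.toNat : Int))], st.2.1 ++ [pvPyBin ((i.toNat : Int))],
       st.2.2.1 ++ [pvPyHex ((i.toNat : Int))], st.2.2.2 ++ [pvPyOct ((i.toNat : Int))]))
    ([], [], [], [])
  -- message accumulation, loop by loop
  let m0 := "" ++ "Decimal numbers: "
  let m1 := st.1.foldl (fun m i => m ++ PySem.Int.toStr i ++ ", ") m0
  let m2 := st.2.2.1.foldl (fun m s => m ++ pvDrop2 s ++ ", ") (m1 ++ "\n" ++ "Hex numbers: ")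
  let m3 := st.2.2.2.foldl (fun m s => m ++ pvDrop2 s ++ ", ") (m2 ++ "\n" ++ "Octal numbers: ")
  st.2.1.foldl (fun m s => m ++ pvDrop2 s ++ ", ") (m3 ++ "\n" ++ "Binary numbers: ")

-- ===== PORT B =====
def stringToAscii_alt (string : String) : String :=
  let acc := string.toList.foldl
    (fun (a : String × String × String × String) ch =>
      (a.1 ++ PySem.Int.toStr ((ch.toNat : Int)) ++ ", ",
       a.2.1 ++ pvDigits 16 ((ch.toNat : Int)) ++ ", ",
       a.2.2.1 ++ pvDigits 8 ((ch.toNat : Int)) ++ ", ",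
       a.2.2.2 ++ pvDigits 2 ((ch.toNat : Int)) ++ ", "))
    ("", "", "", "")
  "Decimal numbers: " ++ acc.1 ++ "\n" ++
  "Hex numbers: " ++ acc.2.1 ++ "\n" ++
  "Octal numbers: " ++ acc.2.2.1 ++ "\n" ++
  "Binary numbers: " ++ acc.2.2.2

-- ===== PRECONDITION & SPEC =====
def Spec_stringToAscii (string : String) (out : String) : Prop := out = stringToAscii_alt string
instance (string : String) (out : String) : Decidable (Spec_stringToAscii string out) := by unfold Spec_stringToAscii; infer_instance

-- ===== CLAIM (what is proved, stated in full; the proofs are below) =====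
def Claim_equal_stringToAscii : Prop := ∀ (string : String), Dom_stringToAscii string → Spec_stringToAscii string (stringToAscii string)

-- ===== LEMMAS AND PROOFS =====

theorem pvDrop2_pyBin (n : Int) : pvDrop2 (pvPyBin n) = pvDigits 2 n := by
  simp [pvDrop2, pvPyBin, pvDigits]

theorem pvDrop2_pyHex (n : Int) : pvDrop2 (pvPyHex n) = pvDigits 16 n := by
  simp [pvDrop2, pvPyHex, pvDigits]

theorem pvDrop2_pyOct (n : Int) : pvDrop2 (pvPyOct n) = pvDigits 8 n := by
  simp [pvDrop2, pvPyOct, pvDigits]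

-- A's list-building loop computes four maps
theorem pv_build (cs : List Char) (d : List Int) (b h o : List String) :
    cs.foldl
      (fun (st : List Int × List String × List String × List String) i =>
        (st.1 ++ [((i.toNat : Int))], st.2.1 ++ [pvPyBin ((i.toNat : Int))],
         st.2.2.1 ++ [pvPyHex ((i.toNat : Int))], st.2.2.2 ++ [pvPyOct ((i.toNat : Int))]))
      (d, b, h, o)
    = (d ++ cs.map (fun c => ((c.toNat : Int))),
       b ++ cs.map (fun c => pvPyBin ((c.toNat : Int))),
       h ++ cs.map (fun c => pvPyHex ((c.toNat : Int))),
       o ++ cs.map (fun c => pvPyOct ((c.toNat : Int)))) := by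
  induction cs generalizing d b h o with
  | nil => simp
  | cons c cs ih => simp [ih]

-- B's tuple loop splits into four independent string folds
theorem pv_split (cs : List Char) (p q r t : String) :
    cs.foldl
      (fun (a : String × String × String × String) ch =>
        (a.1 ++ PySem.Int.toStr ((ch.toNat : Int)) ++ ", ",
         a.2.1 ++ pvDigits 16 ((ch.toNat : Int)) ++ ", ",
         a.2.2.1 ++ pvDigits 8 ((ch.toNat : Int)) ++ ", ",
         a.2.2.2 ++ pvDigits 2 ((ch.toNat : Int)) ++ ", "))
      (p, q, r, t)
    = (cs.foldl (fun m ch => m ++ PySem.Int.toStr ((ch.toNat : Int)) ++ ", ") p,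
       cs.foldl (fun m ch => m ++ pvDigits 16 ((ch.toNat : Int)) ++ ", ") q,
       cs.foldl (fun m ch => m ++ pvDigits 8 ((ch.toNat : Int)) ++ ", ") r,
       cs.foldl (fun m ch => m ++ pvDigits 2 ((ch.toNat : Int)) ++ ", ") t) := by
  induction cs generalizing p q r t with
  | nil => simp
  | cons c cs ih => simp [ih]

-- pulling the accumulator out of a string-appending fold
theorem pv_shift {α : Type} (g : α → String) (cs : List α) (acc : String) :
    cs.foldl (fun m c => m ++ g c) acc = acc ++ cs.foldl (fun m c => m ++ g c) "" := by
  induction cs generalizing acc with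
  | nil => simp
  | cons c cs ih =>
      simp only [List.foldl_cons]
      rw [ih, ih (("" : String) ++ g c)]
      simp [String.append_assoc]

theorem pv_shift2 {α : Type} (g : α → String) (cs : List α) (acc : String) :
    cs.foldl (fun m c => m ++ g c ++ ", ") acc
      = acc ++ cs.foldl (fun m c => m ++ g c ++ ", ") "" := by
  have := pv_shift (fun c => g c ++ ", ") cs acc
  simpa [String.append_assoc] using this

-- ===== VERDICT (by name: the statement is the Claim_ definition above) =====
theorem stringToAscii_spec : Claim_equal_stringToAscii := by
  intro s _
  show stringToAscii s = stringToAscii_alt s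
  unfold stringToAscii stringToAscii_alt
  simp only [pv_build, pv_split, List.nil_append, List.foldl_map,
    pvDrop2_pyBin, pvDrop2_pyHex, pvDrop2_pyOct]
  rw [pv_shift2 (fun i : Char => PySem.Int.toStr ((i.toNat : Int))),
      pv_shift2 (fun i : Char => pvDigits 16 ((i.toNat : Int))),
      pv_shift2 (fun i : Char => pvDigits 8 ((i.toNat : Int))),
      pv_shift2 (fun i : Char => pvDigits 2 ((i.toNat : Int)))]
  simp [String.append_assoc]
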